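-- pv_equiv track=rewrite | github.com/MrBrantCode/unitest_baseline | mut_generate/mist_train_taco/taco_2924/solution.py | lexicographical_minimal_array
-- ===== SOURCE A (Python) =====
-- def lexicographical_minimal_array(arr, K):
--     """
--     Produces the lexicographical minimal array after at most K swaps.
--
--     Parameters:
--     arr (list of int): The array to be sorted.
--     K (int): The maximum number of swaps allowed.
--
--     Returns:
--     list of int: The lexicographical minimal array after at most K swaps.
--     """
--     def lex_sort(N, arr):
--         if N == 0 or not arr:
--             return arr
--         index = arr.index(min(arr[:N+1], key=int))
--         return [arr[index]] + lex_sort(N-index, arr[:index] + arr[index+1:])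
--
--     # Convert array elements to integers
--     arr = list(map(int, arr))
--
--     # Perform at most K swaps
--     for _ in range(K):
--         for i in range(len(arr) - 1):
--             if arr[i] > arr[i + 1]:
--                 arr[i], arr[i + 1] = arr[i + 1], arr[i]
--                 break
--
--     return arr
-- ===== SOURCE B (Python) =====
-- def lexicographical_minimal_array(arr, K):
--     """Insertion-sort-style bubbling with a swap budget K; stops scanning once
--     the budget is spent or the array is sorted: O(n + min(K, inversions))."""
--     res = []
--     k = K
--     for v in map(int, arr):
--         res.append(v)
--         j = len(res) - 1
--         while k > 0 and j > 0 and res[j - 1] > res[j]: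
--             res[j - 1], res[j] = res[j], res[j - 1]
--             j -= 1
--             k -= 1
--     return res
-- ===== Notes on version B (the rewrite author's own statement) =====
-- stated objective: faster
-- what changed: A rescans the whole array from the left K times, each pass performing only the first adjacent-inversion swap; B makes a single insertion-sort-style pass that bubbles each element left while the swap budget K lasts, performing the same swaps in the same order without any rescanning.
import Mathlib
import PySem

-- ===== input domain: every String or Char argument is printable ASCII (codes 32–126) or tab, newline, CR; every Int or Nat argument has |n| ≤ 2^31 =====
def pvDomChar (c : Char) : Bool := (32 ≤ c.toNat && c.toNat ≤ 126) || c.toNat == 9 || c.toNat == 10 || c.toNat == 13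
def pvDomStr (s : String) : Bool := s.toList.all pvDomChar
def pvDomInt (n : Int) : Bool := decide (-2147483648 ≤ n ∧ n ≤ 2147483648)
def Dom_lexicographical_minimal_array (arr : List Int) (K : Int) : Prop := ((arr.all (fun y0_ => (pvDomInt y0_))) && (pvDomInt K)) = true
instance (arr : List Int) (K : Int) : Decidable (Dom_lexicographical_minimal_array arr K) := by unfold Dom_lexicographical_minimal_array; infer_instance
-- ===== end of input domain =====

-- B replaces A's K full left-to-right rescans (each performing the first adjacent
-- inversion swap) by one insertion-sort-style pass that bubbles each element left
-- while the swap budget lasts — same result, O(n + min(K, inversions)) instead of O(K·n).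
-- (A's nested helper `lex_sort` is dead code — never called — and is not ported.)

-- ===== PORT A =====
-- inner loop of A: scan left to right, swap the first adjacent inversion, break
def stepA : List Int → List Int
  | a :: b :: t => if b < a then b :: a :: t else a :: stepA (b :: t)
  | l => l

-- outer loop of A: `for _ in range(K)`
def iterA : Nat → List Int → List Int
  | 0, l => l
  | n + 1, l => iterA n (stepA l)

def lexicographical_minimal_array (arr : List Int) (K : Int) : List Int :=
  iterA K.toNat arr

-- ===== PORT B =====
-- B's inner while loop: bubble v down the (reversed) prefix stack while budget and inversion remain
def bubbleB (k v : Int) : List Int → Int × List Int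
  | [] => (k, [v])
  | t :: s =>
    if 0 < k ∧ v < t then
      let p := bubbleB (k - 1) v s
      (p.1, t :: p.2)
    else (k, v :: t :: s)

-- B's for loop over the input elements
def runB (st : Int × List Int) (xs : List Int) : Int × List Int :=
  xs.foldl (fun p v => bubbleB p.1 v p.2) st

def lexicographical_minimal_array_alt (arr : List Int) (K : Int) : List Int :=
  (runB (K, []) arr).2.reverse

-- ===== PRECONDITION & SPEC =====
def Spec_lexicographical_minimal_array (arr : List Int) (K : Int) (out : List Int) : Prop := out = lexicographical_minimal_array_alt arr K
instance (arr : List Int) (K : Int) (out : List Int) : Decidable (Spec_lexicographical_minimal_array arr K out) := by unfold Spec_lexicographical_minimal_array; infer_instance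

-- ===== CLAIM (what is proved, stated in full; the proofs are below) =====
def Claim_equal_lexicographical_minimal_array : Prop := ∀ (arr : List Int) (K : Int), Dom_lexicographical_minimal_array arr K → Spec_lexicographical_minimal_array arr K (lexicographical_minimal_array arr K)

-- ===== LEMMAS AND PROOFS =====

theorem runB_nil (st : Int × List Int) : runB st [] = st := rfl

theorem runB_cons (st : Int × List Int) (x : Int) (xs : List Int) :
    runB st (x :: xs) = runB (bubbleB st.1 x st.2) xs := rfl

-- a sorted list has no adjacent inversion, so A's scan swaps nothing
theorem stepA_sorted : ∀ (l : List Int), List.IsChain (· ≤ ·) l → stepA l = l := by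
  intro l h
  induction l with
  | nil => rfl
  | cons a t ih =>
    cases t with
    | nil => rfl
    | cons b t' =>
      rcases List.isChain_cons_cons.1 h with ⟨hab, ht⟩
      simp [stepA, not_lt.2 hab, ih ht]

theorem iterA_sorted (n : Nat) (l : List Int) (h : List.IsChain (· ≤ ·) l) :
    iterA n l = l := by
  induction n with
  | zero => rfl
  | succ m ih => simp [iterA, stepA_sorted l h, ih]

-- A's scan over a sorted prefix reaches the first inversion and swaps it
theorem stepA_prefix (a b : Int) (hab : b < a) :
    ∀ (p rest : List Int), List.IsChain (· ≤ ·) (p ++ [a]) →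
      stepA (p ++ a :: b :: rest) = p ++ b :: a :: rest := by
  intro p
  induction p with
  | nil => intro rest _; simp [stepA, hab]
  | cons c p' ih =>
    intro rest h
    rcases List.isChain_cons.1 h with ⟨hc, ht⟩
    cases p' with
    | nil =>
      have hca : c ≤ a := hc a (by simp)
      simp [stepA, not_lt.2 hca, hab]
    | cons d p'' =>
      have hcd : c ≤ d := hc d (by simp)
      have := ih rest ht
      simp [stepA, not_lt.2 hcd] at this ⊢
      exact this

-- with an exhausted budget B performs no swaps at all
theorem bubbleB_nonpos (k v : Int) (hk : k ≤ 0) :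
    ∀ s, bubbleB k v s = (k, v :: s) := by
  intro s; cases s with
  | nil => rfl
  | cons t s' => simp [bubbleB, not_lt.2 hk]

theorem runB_nonpos (k : Int) (hk : k ≤ 0) :
    ∀ (xs s : List Int), runB (k, s) xs = (k, xs.reverse ++ s) := by
  intro xs
  induction xs with
  | nil => intro s; simp [runB_nil]
  | cons x xs' ih =>
    intro s
    rw [runB_cons]
    simp only [bubbleB_nonpos k x hk]
    rw [ih (x :: s)]
    simp

-- pushing an element at least as large as the stack head never swaps
theorem bubbleB_push_ge (k t : Int) (r : List Int)
    (h : ∀ x, r.head? = some x → ¬ t < x) : bubbleB k t r = (k, t :: r) := by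
  cases r with
  | nil => rfl
  | cons x r' =>
    have := h x rfl
    simp [bubbleB, this]

-- the head of the stack after a bubble step is either the old head or the new element
theorem bubbleB_head (k v t : Int) (s : List Int) :
    (bubbleB k v (t :: s)).2.head? = some (if 0 < k ∧ v < t then t else v) := by
  by_cases h : 0 < k ∧ v < t <;> simp [bubbleB, h]

-- MAIN INVARIANT: running B with budget k over remaining input xs, on top of a
-- nonincreasing stack s (the reversed, sorted prefix), equals k rounds of A's
-- first-inversion swap applied to the whole current array s.reverse ++ xs.
theorem mainG : ∀ (n : Nat) (k : Int) (s xs : List Int),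
    2 * k.toNat + xs.length ≤ n → List.IsChain (· ≥ ·) s →
    (runB (k, s) xs).2.reverse = iterA k.toNat (s.reverse ++ xs) := by
  intro n
  induction n with
  | zero =>
    intro k s xs hm hs
    have hk : k ≤ 0 := by omega
    have hx : xs = [] := by
      cases xs with
      | nil => rfl
      | cons a b => simp at hm
    subst hx
    have : k.toNat = 0 := by omega
    simp [runB_nil, this, iterA]
  | succ m ih =>
    intro k s xs hm hs
    by_cases hk : k ≤ 0
    · have : k.toNat = 0 := by omega
      rw [runB_nonpos k hk xs s, this]
      simp [iterA]
    · rw [not_le] at hk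
      have hkt : k.toNat = (k - 1).toNat + 1 := by omega
      cases xs with
      | nil =>
        rw [runB_nil]
        have hsr : List.IsChain (· ≤ ·) s.reverse := by
          rw [List.isChain_reverse]; exact hs
        rw [iterA_sorted _ _ (by simpa using hsr)]
        simp
      | cons x xs' =>
        cases s with
        | nil =>
          rw [runB_cons]
          have : bubbleB k x [] = (k, [x]) := rfl
          rw [this]
          have := ih k [x] xs' (by simp at hm ⊢; omega) (List.isChain_singleton x)
          simpa using this
        | cons t s' =>
          rcases List.isChain_cons.1 hs with ⟨ht, hs'⟩
          by_cases hxt : x < t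
          · -- junction inversion: B spends one budget unit on the swap A would do first
            have hb : bubbleB k x (t :: s') =
                ((bubbleB (k - 1) x s').1, t :: (bubbleB (k - 1) x s').2) := by
              simp [bubbleB, hk, hxt]
            -- t cannot be smaller than the head left after bubbling x into s'
            have hcond : ∀ y, (bubbleB (k - 1) x s').2.head? = some y → ¬ t < y := by
              cases s' with
              | nil =>
                intro y hy
                simp [bubbleB] at hy
                omega
              | cons u s'' =>
                intro y hy
                rw [bubbleB_head] at hy
                have htu : t ≥ u := ht u rfl
                by_cases hc : 0 < k - 1 ∧ x < u <;> simp [hc] at hy <;> omega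
            have hpush : bubbleB (bubbleB (k - 1) x s').1 t (bubbleB (k - 1) x s').2
                = ((bubbleB (k - 1) x s').1, t :: (bubbleB (k - 1) x s').2) :=
              bubbleB_push_ge _ _ _ hcond
            -- B on (k, t::s') (x::xs')  =  B on (k-1, s') (x::t::xs')
            have hstep : runB (k, t :: s') (x :: xs') = runB (k - 1, s') (x :: t :: xs') := by
              rw [runB_cons, runB_cons]
              simp only [hb]
              rw [runB_cons, hpush]
            rw [hstep]
            rw [ih (k - 1) s' (x :: t :: xs') (by simp at hm ⊢; omega) hs']
            have hchain : List.IsChain (· ≤ ·) (s'.reverse ++ [t]) := by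
              have : List.IsChain (· ≤ ·) (t :: s').reverse := by
                rw [List.isChain_reverse]; exact hs
              simpa using this
            have hA : stepA ((t :: s').reverse ++ x :: xs') = s'.reverse ++ x :: t :: xs' := by
              have := stepA_prefix t x hxt s'.reverse xs' hchain
              simpa using this
            rw [hkt]
            simp only [iterA]
            rw [hA]
          · -- no inversion at the junction: push x, budget untouched
            rw [runB_cons]
            have hb : bubbleB k x (t :: s') = (k, x :: t :: s') := by
              simp [bubbleB, hxt]
            rw [hb]
            have hchain2 : List.IsChain (· ≥ ·) (x :: t :: s') :=
              List.isChain_cons_cons.2 ⟨not_lt.1 hxt, hs⟩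
            have := ih k (x :: t :: s') xs' (by simp at hm ⊢; omega) hchain2
            simpa using this

-- ===== VERDICT (by name: the statement is the Claim_ definition above) =====
theorem lexicographical_minimal_array_spec : Claim_equal_lexicographical_minimal_array := by
  intro arr K _
  unfold Spec_lexicographical_minimal_array lexicographical_minimal_array
    lexicographical_minimal_array_alt
  rw [mainG (2 * K.toNat + arr.length) K [] arr (le_refl _) List.isChain_nil]
  simp
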